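-- pv_equiv track=rewrite | github.com/enamoredg-n/tracewise-pcb-validator | kicad_parser.py | _iter_nested_blocks
-- ===== SOURCE A (Python) =====
-- def _iter_nested_blocks(lines: list[str], prefixes: tuple[str, ...]):
--     current: list[str] = []
--     balance = 0
--     in_block = False
--
--     for line in lines:
--         stripped = line.lstrip()
--         if not in_block and any(stripped.startswith(f"({prefix}") for prefix in prefixes):
--             in_block = True
--             current = [line]
--             balance = line.count("(") - line.count(")")
--             if balance <= 0:
--                 yield current
--                 current = []
--                 balance = 0
--                 in_block = False
--             continue
--
--         if in_block:
--             current.append(line)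
--             balance += line.count("(") - line.count(")")
--             if balance <= 0:
--                 yield current
--                 current = []
--                 balance = 0
--                 in_block = False
-- ===== SOURCE B (Python) =====
-- def _iter_nested_blocks(lines: list[str], prefixes: tuple[str, ...]):
--     n = len(lines)
--     i = 0
--     while i < n:
--         stripped = lines[i].lstrip()
--         if any(stripped.startswith("(" + p) for p in prefixes):
--             block = []
--             bal = 0
--             j = i
--             while j < n:
--                 line = lines[j]
--                 block.append(line)
--                 bal += line.count("(") - line.count(")")
--                 j += 1
--                 if bal <= 0:
--                     yield block
--                     break
--             else:
--                 return  # unclosed block at EOF: nothing more is yielded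
--             i = j
--         else:
--             i += 1
-- ===== Notes on version B (the rewrite author's own statement) =====
-- stated objective: alternative
-- what changed: Replaced A's single pass with in_block/current/balance flag state by an outer scan that only looks for start lines plus a separate inner loop that collects one balanced block (returning the remaining lines), removing the mutable state machine.
import Mathlib
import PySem

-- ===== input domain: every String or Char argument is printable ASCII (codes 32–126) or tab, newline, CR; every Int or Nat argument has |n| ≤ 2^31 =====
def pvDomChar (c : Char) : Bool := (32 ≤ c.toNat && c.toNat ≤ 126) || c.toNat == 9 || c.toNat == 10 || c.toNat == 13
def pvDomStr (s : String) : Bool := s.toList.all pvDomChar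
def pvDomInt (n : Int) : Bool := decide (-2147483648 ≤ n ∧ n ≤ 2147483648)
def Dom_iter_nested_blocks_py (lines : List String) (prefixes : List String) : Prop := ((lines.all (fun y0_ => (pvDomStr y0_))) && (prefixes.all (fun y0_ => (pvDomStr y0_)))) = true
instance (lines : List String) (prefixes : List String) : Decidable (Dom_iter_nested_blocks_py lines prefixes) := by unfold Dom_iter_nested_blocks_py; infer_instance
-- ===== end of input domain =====

-- B replaces A's in_block/current/balance state machine by an outer scan for start
-- lines with a separate inner block-collecting loop (different decomposition, same cost).

-- ===== PORT A =====
-- paren balance contribution of one line: line.count("(") - line.count(")")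
def pvDelta (line : String) : Int :=
  (PySem.Str.count line "(" : Int) - (PySem.Str.count line ")" : Int)

-- the for-loop of A, state = (current, balance, in_block)
def pvGoA (prefixes : List String) :
    List String → List String → Int → Bool → List (List String)
  | [], _, _, _ => []
  | line :: rest, current, balance, inb =>
    let stripped := PySem.Str.lstrip line
    if !inb && prefixes.any (fun p => PySem.Str.startswith stripped ("(" ++ p)) then
      let current := [line]
      let balance := pvDelta line
      if balance ≤ 0 then current :: pvGoA prefixes rest [] 0 false
      else pvGoA prefixes rest current balance true
    else if inb then
      let current := current ++ [line]
      let balance := balance + pvDelta line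
      if balance ≤ 0 then current :: pvGoA prefixes rest [] 0 false
      else pvGoA prefixes rest current balance true
    else pvGoA prefixes rest current balance inb

def iter_nested_blocks_py (lines : List String) (prefixes : List String) : List (List String) :=
  pvGoA prefixes lines [] 0 false

-- ===== PORT B =====
-- B's inner while-loop: collect lines into the block until balance ≤ 0;
-- returns the block and the remaining lines, or none if the input is exhausted (unclosed at EOF)
def pvInner : List String → Int → List String → Option (List String × List String)
  | [], _, _ => none
  | line :: rest, bal, block =>
    let block := block ++ [line]
    let bal := bal + pvDelta line
    if bal ≤ 0 then some (block, rest) else pvInner rest bal block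

theorem pvInner_rest_len : ∀ (xs : List String) (bal : Int) (acc b : List String)
    (r : List String), pvInner xs bal acc = some (b, r) → r.length < xs.length := by
  intro xs
  induction xs with
  | nil => intro bal acc b r h; simp only [pvInner] at h; exact absurd h (by simp)
  | cons x rest ih =>
    intro bal acc b r h
    simp only [pvInner] at h
    split at h
    · cases h; simp
    · have := ih _ _ _ _ h; simp; omega

-- B's outer scan
def pvGoB (prefixes : List String) : List String → List (List String)
  | [] => []
  | line :: rest =>
    let stripped := PySem.Str.lstrip line
    if prefixes.any (fun p => PySem.Str.startswith stripped ("(" ++ p)) then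
      match h : pvInner (line :: rest) 0 [] with
      | some (block, rest') => block :: pvGoB prefixes rest'
      | none => []
    else pvGoB prefixes rest
  termination_by xs => xs.length
  decreasing_by
    · have := pvInner_rest_len _ _ _ _ _ h; simpa using this
    · simp

def iter_nested_blocks_py_alt (lines : List String) (prefixes : List String) : List (List String) :=
  pvGoB prefixes lines

-- ===== PRECONDITION & SPEC =====
def Spec_iter_nested_blocks_py (lines : List String) (prefixes : List String) (out : List (List String)) : Prop := out = iter_nested_blocks_py_alt lines prefixes
instance (lines : List String) (prefixes : List String) (out : List (List String)) : Decidable (Spec_iter_nested_blocks_py lines prefixes out) := by unfold Spec_iter_nested_blocks_py; infer_instance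

-- ===== CLAIM (what is proved, stated in full; the proofs are below) =====
def Claim_equal_iter_nested_blocks_py : Prop := ∀ (lines : List String) (prefixes : List String), Dom_iter_nested_blocks_py lines prefixes → Spec_iter_nested_blocks_py lines prefixes (iter_nested_blocks_py lines prefixes)

-- ===== LEMMAS AND PROOFS =====

-- non-dependent equation lemmas for pvGoB
theorem pvGoB_nil (prefixes : List String) : pvGoB prefixes [] = [] := by
  rw [pvGoB]

theorem pvGoB_cons (prefixes : List String) (line : String) (rest : List String) :
    pvGoB prefixes (line :: rest) =
      if prefixes.any (fun p => PySem.Str.startswith (PySem.Str.lstrip line) ("(" ++ p)) then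
        match pvInner (line :: rest) 0 [] with
        | some (block, rest') => block :: pvGoB prefixes rest'
        | none => []
      else pvGoB prefixes rest := by
  rw [pvGoB]
  split
  · split <;> rename_i heq <;> simp [heq]
  · rfl

-- inside a block, A behaves like B's inner loop followed by A out of block
theorem pvGoA_inblock (prefixes : List String) :
    ∀ (xs : List String) (acc : List String) (bal : Int),
      pvGoA prefixes xs acc bal true =
        match pvInner xs bal acc with
        | some (block, rest') => block :: pvGoA prefixes rest' [] 0 false
        | none => [] := by
  intro xs
  induction xs with
  | nil => intro acc bal; simp [pvGoA, pvInner]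
  | cons line rest ih =>
    intro acc bal
    by_cases h : bal + pvDelta line ≤ 0
    · simp [pvGoA, pvInner, h]
    · simp [pvGoA, pvInner, h, ih]

-- out of block, A equals B (current/balance are dead state)
theorem pvGoA_eq_pvGoB (prefixes : List String) :
    ∀ (n : Nat) (xs : List String), xs.length ≤ n → ∀ (acc : List String) (bal : Int),
      pvGoA prefixes xs acc bal false = pvGoB prefixes xs := by
  intro n
  induction n with
  | zero =>
    intro xs hxs acc bal
    have : xs = [] := by cases xs <;> simp_all
    subst this; simp [pvGoA, pvGoB_nil]
  | succ n ih =>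
    intro xs hxs acc bal
    cases xs with
    | nil => simp [pvGoA, pvGoB_nil]
    | cons line rest =>
      rw [pvGoB_cons]
      simp only [pvGoA, Bool.not_false, Bool.true_and]
      split
      · -- start line found
        split
        · -- block closes on its own line
          rename_i hcond hbal
          have hinner : pvInner (line :: rest) 0 [] = some ([line], rest) := by
            simp [pvInner, hbal]
          simp only [hinner]
          rw [ih rest (by simp at hxs; omega) [] 0]
        · -- block stays open
          rename_i hcond hbal
          have hinner : pvInner (line :: rest) 0 [] =
              pvInner rest (pvDelta line) [line] := by
            simp [pvInner, hbal]
          rw [pvGoA_inblock, hinner]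
          cases h : pvInner rest (pvDelta line) [line] with
          | none => rfl
          | some p =>
            obtain ⟨block, rest'⟩ := p
            have hlen : rest'.length < rest.length := pvInner_rest_len _ _ _ _ _ h
            exact congrArg (block :: ·) (ih rest' (by simp at hxs; omega) [] 0)
      · exact ih rest (by simp at hxs; omega) acc bal

-- ===== VERDICT (by name: the statement is the Claim_ definition above) =====
theorem iter_nested_blocks_py_spec : Claim_equal_iter_nested_blocks_py := by
  intro lines prefixes _
  unfold Spec_iter_nested_blocks_py iter_nested_blocks_py iter_nested_blocks_py_alt
  exact pvGoA_eq_pvGoB prefixes lines.length lines le_rfl [] 0
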